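-- pv_equiv track=rewrite | github.com/Coolmeteor/COSC-3P95-Assignment-1-Logs | question5.py | deltaDebugging
-- ===== SOURCE A (Python) =====
-- def processString(input_str):
--     output_str = ""
--     for char in input_str:
--         if char.isupper():
--             output_str += char.lower()
--         elif char.isnumeric():
--             output_str += char * 2
--         else:
--             output_str += char.upper()
--
--     return output_str
--
-- def processStringError(input_str):
--     output_str = processString(input_str)
--     if len(output_str) != len(input_str):
--         return True
--     else:
--         return False
--
-- def deltaDebugging(input_str):
--     if len(input_str) > 1:
--         firstHalf, secondHalf = input_str[:len(input_str) // 2], input_str[len(input_str) // 2:]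
--         if processStringError(firstHalf):
--             return deltaDebugging(firstHalf)
--         elif processStringError(secondHalf):
--             return deltaDebugging(secondHalf)
--     return input_str
-- ===== SOURCE B (Python) =====
-- def deltaDebugging(input_str):
--     # Single linear scan: A's recursive halving isolates the leftmost digit
--     # character (a digit is the only char that changes processString's length);
--     # if there is no digit, A returns the input unchanged.
--     for ch in input_str:
--         if ch.isdigit():
--             return ch
--     return input_str
-- ===== Notes on version B (the rewrite author's own statement) =====
-- stated objective: faster
-- what changed: Replaced the recursive binary-search delta-debugging (which re-processes each half to test for a length change) by a single left-to-right scan returning the first digit character, or the input if there is none.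
import Mathlib
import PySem

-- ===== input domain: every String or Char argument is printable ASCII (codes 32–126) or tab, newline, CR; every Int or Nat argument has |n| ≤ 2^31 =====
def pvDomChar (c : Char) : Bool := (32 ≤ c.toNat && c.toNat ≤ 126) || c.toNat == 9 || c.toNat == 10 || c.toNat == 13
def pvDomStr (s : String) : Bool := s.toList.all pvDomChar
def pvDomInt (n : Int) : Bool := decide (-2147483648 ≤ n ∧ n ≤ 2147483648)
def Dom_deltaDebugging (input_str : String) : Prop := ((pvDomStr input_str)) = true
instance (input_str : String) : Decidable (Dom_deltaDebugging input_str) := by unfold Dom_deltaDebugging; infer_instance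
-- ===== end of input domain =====

-- B replaces A's recursive halving (re-processing each half) by one linear scan
-- for the first digit character; objective: faster (asymptotic).

-- ===== PORT A =====
-- processString: builds output char by char; 'char.isnumeric()' is ported as
-- PySem.Chars.isdigit, exact on the ASCII domain Dom_deltaDebugging.
def processChars (cs : List Char) : List Char :=
  cs.foldl (fun acc c =>
    if PySem.Chars.isupper c then acc ++ [PySem.Chars.lowerChar c]
    else if PySem.Chars.isdigit c then acc ++ [c, c]
    else acc ++ [PySem.Chars.upperChar c]) []

def processStringErrorChars (cs : List Char) : Bool :=
  if (processChars cs).length ≠ cs.length then true else false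

-- firstHalf/secondHalf: the tuple assignment 'firstHalf, secondHalf = input_str[:n//2], input_str[n//2:]'
def firstHalf (cs : List Char) : List Char :=
  PySem.List.slice cs none (some (PySem.Int.floordiv (cs.length : Int) 2))
def secondHalf (cs : List Char) : List Char :=
  PySem.List.slice cs (some (PySem.Int.floordiv (cs.length : Int) 2)) none

theorem floordiv_len_two (cs : List Char) :
    PySem.Int.floordiv (cs.length : Int) 2 = ((cs.length / 2 : Nat) : Int) :=
  by exact_mod_cast PySem.Int.floordiv_natCast cs.length 2

theorem firstHalf_length_lt (cs : List Char) (h : cs.length > 1) :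
    (firstHalf cs).length < cs.length := by
  rw [firstHalf, floordiv_len_two, PySem.List.slice_to_natCast]
  simp; omega

theorem secondHalf_length_lt (cs : List Char) (h : cs.length > 1) :
    (secondHalf cs).length < cs.length := by
  rw [secondHalf, floordiv_len_two, PySem.List.slice_from_natCast]
  simp; omega

def deltaDebuggingAux (cs : List Char) : List Char :=
  if h : cs.length > 1 then
    if processStringErrorChars (firstHalf cs) then deltaDebuggingAux (firstHalf cs)
    else if processStringErrorChars (secondHalf cs) then deltaDebuggingAux (secondHalf cs)
    else cs
  else cs
termination_by cs.length
decreasing_by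
  · exact firstHalf_length_lt cs h
  · exact secondHalf_length_lt cs h

def deltaDebugging (input_str : String) : String :=
  String.ofList (deltaDebuggingAux input_str.toList)

-- ===== PORT B =====
def deltaDebugging_alt (input_str : String) : String :=
  match input_str.toList.find? (fun c => PySem.Chars.isdigit c) with
  | some c => String.ofList [c]
  | none => input_str

-- ===== PRECONDITION & SPEC =====
def Spec_deltaDebugging (input_str : String) (out : String) : Prop := out = deltaDebugging_alt input_str
instance (input_str : String) (out : String) : Decidable (Spec_deltaDebugging input_str out) := by unfold Spec_deltaDebugging; infer_instance

-- ===== CLAIM (what is proved, stated in full; the proofs are below) =====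
def Claim_equal_deltaDebugging : Prop := ∀ (input_str : String), Dom_deltaDebugging input_str → Spec_deltaDebugging input_str (deltaDebugging input_str)

-- ===== LEMMAS AND PROOFS =====

theorem isdigit_false_of_isupper (c : Char) (h : PySem.Chars.isupper c = true) :
    PySem.Chars.isdigit c = false := by
  simp only [PySem.Chars.isupper, Bool.and_eq_true, decide_eq_true_eq] at h
  have h9 : ¬ c ≤ '9' := fun hc => absurd h.1 (not_le.mpr (lt_of_le_of_lt hc (by decide)))
  simp [PySem.Chars.isdigit, h9]

theorem processChars_foldl_length (cs : List Char) (acc : List Char) :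
    (cs.foldl (fun acc c =>
      if PySem.Chars.isupper c then acc ++ [PySem.Chars.lowerChar c]
      else if PySem.Chars.isdigit c then acc ++ [c, c]
      else acc ++ [PySem.Chars.upperChar c]) acc).length
      = acc.length + cs.length + cs.countP (fun c => PySem.Chars.isdigit c) := by
  induction cs generalizing acc with
  | nil => simp
  | cons c cs ih =>
    simp only [List.foldl_cons, List.countP_cons, List.length_cons]
    by_cases hd : PySem.Chars.isdigit c = true
    · simp only [hd, if_true]
      split_ifs with h1
      · exact absurd hd (by simp [isdigit_false_of_isupper c h1])
      · rw [ih]; simp; omega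
    · have hd' : PySem.Chars.isdigit c = false := by simpa using hd
      simp only [hd', Bool.false_eq_true, if_false]
      split_ifs with h1
      · rw [ih]; simp; omega
      · rw [ih]; simp; omega

theorem processStringErrorChars_eq (cs : List Char) :
    processStringErrorChars cs = cs.any (fun c => PySem.Chars.isdigit c) := by
  unfold processStringErrorChars processChars
  rw [processChars_foldl_length]
  rcases h : cs.any (fun c => PySem.Chars.isdigit c) with _ | _
  · have : cs.countP (fun c => PySem.Chars.isdigit c) = 0 := by
      rw [List.countP_eq_zero]
      intro a ha
      simpa using (List.any_eq_false.mp h) a ha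
    simp [this]
  · have : 0 < cs.countP (fun c => PySem.Chars.isdigit c) := by
      rw [List.countP_pos_iff]
      simpa using List.any_eq_true.mp h
    rw [if_pos (by omega)]

theorem halves_append (cs : List Char) : firstHalf cs ++ secondHalf cs = cs := by
  rw [firstHalf, secondHalf, floordiv_len_two, PySem.List.slice_to_natCast,
    PySem.List.slice_from_natCast, List.take_append_drop]

theorem find?_of_no_error (cs : List Char) (h : ¬ processStringErrorChars cs = true) :
    cs.find? (fun c => PySem.Chars.isdigit c) = none := by
  rw [List.find?_eq_none]
  intro a ha
  have := (List.any_eq_false.mp (by simpa [processStringErrorChars_eq] using h)) a ha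
  simpa using this

theorem find?_isSome_of_error (cs : List Char) (h : processStringErrorChars cs = true) :
    (cs.find? (fun c => PySem.Chars.isdigit c)).isSome := by
  obtain ⟨c, hc, hdig⟩ := List.any_eq_true.mp (by simpa [processStringErrorChars_eq] using h)
  rw [Option.isSome_iff_ne_none]
  intro hf
  exact absurd (by simpa using List.find?_eq_none.mp hf c hc) (by simpa using hdig)

theorem deltaDebuggingAux_eq (cs : List Char) :
    deltaDebuggingAux cs =
      match cs.find? (fun c => PySem.Chars.isdigit c) with
      | some c => [c]
      | none => cs := by
  induction cs using (deltaDebuggingAux.induct) with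
  | case1 cs h hfh ih =>
    rw [deltaDebuggingAux, dif_pos h, if_pos hfh, ih]
    conv_rhs => rw [← halves_append cs]
    rw [List.find?_append]
    rcases hf : (firstHalf cs).find? (fun c => PySem.Chars.isdigit c) with _ | c'
    · exact absurd (Option.isSome_iff_ne_none.mp (find?_isSome_of_error _ hfh)) (by simp [hf])
    · simp
  | case2 cs h hfh hsh ih =>
    rw [deltaDebuggingAux, dif_pos h, if_neg hfh, if_pos hsh, ih]
    conv_rhs => rw [← halves_append cs]
    rw [List.find?_append, find?_of_no_error _ hfh]
    rcases hf : (secondHalf cs).find? (fun c => PySem.Chars.isdigit c) with _ | c'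
    · exact absurd (Option.isSome_iff_ne_none.mp (find?_isSome_of_error _ hsh)) (by simp [hf])
    · simp
  | case3 cs h hfh hsh =>
    rw [deltaDebuggingAux, dif_pos h, if_neg hfh, if_neg hsh]
    have : cs.find? (fun c => PySem.Chars.isdigit c) = none := by
      conv_lhs => rw [← halves_append cs]
      rw [List.find?_append, find?_of_no_error _ hfh, find?_of_no_error _ hsh]
      rfl
    simp [this]
  | case4 cs h =>
    rw [deltaDebuggingAux, dif_neg h]
    rcases cs with _ | ⟨c, _ | ⟨d, t⟩⟩
    · simp
    · rcases hd : PySem.Chars.isdigit c with _ | _ <;> simp [List.find?, hd]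
    · exfalso; simp only [List.length_cons, gt_iff_lt] at h; omega

-- ===== VERDICT (by name: the statement is the Claim_ definition above) =====
theorem deltaDebugging_spec : Claim_equal_deltaDebugging := by
  intro s _
  unfold Spec_deltaDebugging deltaDebugging deltaDebugging_alt
  rw [deltaDebuggingAux_eq]
  rcases h : s.toList.find? (fun c => PySem.Chars.isdigit c) with _ | c
  · simp [String.ofList_toList]
  · simp
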